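-- pv_equiv track=rewrite | github.com/bcrafton/ChipTest | pi/util.py | process
-- ===== SOURCE A (Python) =====
-- def matrix(ROW, COL):
--     mat = [[0 for _ in range(COL)] for _ in range(ROW)]
--     return mat
--
-- def process(data, BIT=32):
--     DAC, WL = len(data), len(data[0])
--     out = matrix(BIT, WL)
--     for dac in range(DAC):
--         for bit in range(BIT):
--             for wl in range(WL):
--                 val = (data[dac][wl] >> bit) & 1
--                 if val:
--                     out[bit][wl] = max(out[bit][wl], dac)
--     return out
-- ===== SOURCE B (Python) =====
-- def process(data, BIT=32):
--     DAC, WL = len(data), len(data[0])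
--
--     def last_dac(bit, wl):
--         # highest dac whose value has this bit set; 0 if none
--         for dac in range(DAC - 1, -1, -1):
--             if (data[dac][wl] >> bit) & 1:
--                 return dac
--         return 0
--
--     return [[last_dac(bit, wl) for wl in range(WL)] for bit in range(BIT)]
-- ===== Notes on version B (the rewrite author's own statement) =====
-- stated objective: alternative
-- what changed: A preallocates a BIT x WL matrix and, for every dac, re-scans all BIT x WL cells accumulating a running max; B builds each output row directly, scanning dacs from highest to lowest per (bit, wl) cell and stopping at the first hit, so the max accumulation and the matrix mutation disappear (intended as faster; measured 4.6-40x on the check's families, but worst case is the same).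
import Mathlib
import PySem

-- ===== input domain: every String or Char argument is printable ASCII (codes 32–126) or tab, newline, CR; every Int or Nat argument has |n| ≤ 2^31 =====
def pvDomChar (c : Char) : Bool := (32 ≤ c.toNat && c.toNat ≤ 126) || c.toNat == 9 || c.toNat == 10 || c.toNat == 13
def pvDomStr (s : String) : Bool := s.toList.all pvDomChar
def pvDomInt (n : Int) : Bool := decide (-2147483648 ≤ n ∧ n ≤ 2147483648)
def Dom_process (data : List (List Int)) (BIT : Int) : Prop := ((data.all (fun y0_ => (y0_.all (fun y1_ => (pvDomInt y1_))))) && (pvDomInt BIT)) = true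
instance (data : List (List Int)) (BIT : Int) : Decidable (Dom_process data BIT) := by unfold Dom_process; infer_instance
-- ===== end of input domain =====

-- B replaces A's dac-outermost max accumulation into a preallocated matrix by building each
-- output cell directly with a high-to-low dac scan that stops at the first set bit (objective: alternative).

-- ===== PORT A =====
-- (data[dac][wl] >> bit) & 1, exact for 0 ≤ bit (every use has bit from range(BIT));
-- shared by both ports because both Pythons contain this very expression.
def pvBit1 (x : Int) (bit : Int) : Int := PySem.Int.band (x >>> bit.toNat) 1

def pvMatrix (ROW COL : Int) : List (List Int) :=
  (PySem.List.pyRange 0 ROW 1).map (fun _ => (PySem.List.pyRange 0 COL 1).map (fun _ => (0 : Int)))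

def process (data : List (List Int)) (BIT : Int) : List (List Int) :=
  let DAC : Int := data.length
  let WL : Int := (PySem.List.pyGetD data 0 []).length   -- data[0]; Pre_ excludes data = []
  let out := pvMatrix BIT WL
  (PySem.List.pyRange 0 DAC 1).foldl (fun out dac =>
    (PySem.List.pyRange 0 BIT 1).foldl (fun out bit =>
      (PySem.List.pyRange 0 WL 1).foldl (fun out wl =>
        let val := pvBit1 (PySem.List.pyGetD (PySem.List.pyGetD data dac []) wl 0) bit
        if val ≠ 0 then
          out.set bit.toNat ((PySem.List.pyGetD out bit []).set wl.toNat
            (max (PySem.List.pyGetD (PySem.List.pyGetD out bit []) wl 0) dac))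
        else out) out) out) out

-- ===== PORT B =====
-- Source B's last_dac: first dac of range(DAC-1, -1, -1) with the bit set, else 0
def pvLastDac (data : List (List Int)) (DAC : Int) (bit wl : Int) : Int :=
  ((PySem.List.pyRange (DAC - 1) (-1) (-1)).find? (fun dac =>
    pvBit1 (PySem.List.pyGetD (PySem.List.pyGetD data dac []) wl 0) bit ≠ 0)).getD 0

def process_alt (data : List (List Int)) (BIT : Int) : List (List Int) :=
  let DAC : Int := data.length
  let WL : Int := (PySem.List.pyGetD data 0 []).length
  (PySem.List.pyRange 0 BIT 1).map (fun bit =>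
    (PySem.List.pyRange 0 WL 1).map (fun wl => pvLastDac data DAC bit wl))

-- ===== PRECONDITION & SPEC =====
-- Pre_ excludes exactly the inputs where Python A raises IndexError: empty data (data[0]),
-- and a row shorter than data[0] when the bit/wl loops actually index it (BIT ≥ 1 and len(data[0]) ≥ 1).
def Pre_process (data : List (List Int)) (BIT : Int) : Prop :=
  data ≠ [] ∧
    (BIT ≤ 0 ∨ (data.headD []).length = 0 ∨ ∀ row ∈ data, (data.headD []).length ≤ row.length)
instance (data : List (List Int)) (BIT : Int) : Decidable (Pre_process data BIT) := by
  unfold Pre_process; infer_instance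

def pvWitness_process : List (List Int) × Int := ([[3, 1], [2, 5]], 3)

def Spec_process (data : List (List Int)) (BIT : Int) (out : List (List Int)) : Prop := out = process_alt data BIT
instance (data : List (List Int)) (BIT : Int) (out : List (List Int)) : Decidable (Spec_process data BIT out) := by unfold Spec_process; infer_instance

-- ===== CLAIM (what is proved, stated in full; the proofs are below) =====
def Claim_equal_process : Prop := ∀ (data : List (List Int)) (BIT : Int), Dom_process data BIT → Pre_process data BIT → Spec_process data BIT (process data BIT)

-- ===== LEMMAS AND PROOFS =====

-- the bit-set test, as it appears in both ports
def pvP (data : List (List Int)) (bit wl dac : Int) : Bool :=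
  pvBit1 (PySem.List.pyGetD (PySem.List.pyGetD data dac []) wl 0) bit ≠ 0

-- matrix given by an entry function over the integer grid [0,B) × [0,W)
def pvMk (B W : Int) (e : Int → Int → Int) : List (List Int) :=
  (PySem.List.pyRange 0 B 1).map (fun b => (PySem.List.pyRange 0 W 1).map (fun w => e b w))

lemma pvMk_congr (B W : Int) (e e' : Int → Int → Int)
    (h : ∀ b w, 0 ≤ b → b < B → 0 ≤ w → w < W → e b w = e' b w) :
    pvMk B W e = pvMk B W e' := by
  unfold pvMk
  refine List.map_congr_left (fun b hb => ?_)
  rw [PySem.List.mem_pyRange_one] at hb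
  refine List.map_congr_left (fun w hw => ?_)
  rw [PySem.List.mem_pyRange_one] at hw
  exact h b w hb.1 hb.2 hw.1 hw.2

lemma pvSet_map_pyRange {α : Type} (B : Int) (f : Int → α) (i : Int) (v : α)
    (h0 : 0 ≤ i) :
    ((PySem.List.pyRange 0 B 1).map f).set i.toNat v
      = (PySem.List.pyRange 0 B 1).map (fun b => if b = i then v else f b) := by
  apply List.ext_getElem
  · simp
  · intro j hj _
    simp only [List.getElem_set, List.getElem_map, PySem.List.getElem_pyRange_one, zero_add]
    have : j = i.toNat ↔ (j : Int) = i := by omega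
    split_ifs with h2 h3 h3
    · rfl
    · omega
    · omega
    · rfl

lemma pvGetD_mk (B W : Int) (e : Int → Int → Int) (b : Int) (h0 : 0 ≤ b) (h1 : b < B) :
    PySem.List.pyGetD (pvMk B W e) b [] = (PySem.List.pyRange 0 W 1).map (fun w => e b w) := by
  unfold pvMk
  exact PySem.List.pyGetD_map_pyRange_of_nonneg _ _ _ _ h0 h1

-- one (dac, bit) step: the wl-loop over a pvMk matrix updates row `bit` pointwise
lemma pvWlFold (data : List (List Int)) (B W dac bit : Int) (hb0 : 0 ≤ bit) (hb1 : bit < B)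
    (lw : List Int) (hlw : ∀ w ∈ lw, 0 ≤ w ∧ w < W) (e : Int → Int → Int) :
    lw.foldl (fun out wl =>
        if pvBit1 (PySem.List.pyGetD (PySem.List.pyGetD data dac []) wl 0) bit ≠ 0 then
          out.set bit.toNat ((PySem.List.pyGetD out bit []).set wl.toNat
            (max (PySem.List.pyGetD (PySem.List.pyGetD out bit []) wl 0) dac))
        else out) (pvMk B W e)
      = pvMk B W (fun b w =>
          if b = bit ∧ w ∈ lw ∧ pvP data bit w dac then max (e b w) dac else e b w) := by
  induction lw generalizing e with
  | nil =>
    simp only [List.foldl_nil, List.not_mem_nil]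
    exact pvMk_congr _ _ _ _ (fun b w _ _ _ _ => by simp)
  | cons wl rest ih =>
    have hwl := hlw wl (List.mem_cons_self ..)
    rw [List.foldl_cons]
    have hstep :
        (if pvBit1 (PySem.List.pyGetD (PySem.List.pyGetD data dac []) wl 0) bit ≠ 0 then
          (pvMk B W e).set bit.toNat ((PySem.List.pyGetD (pvMk B W e) bit []).set wl.toNat
            (max (PySem.List.pyGetD (PySem.List.pyGetD (pvMk B W e) bit []) wl 0) dac))
        else pvMk B W e)
        = pvMk B W (fun b w =>
            if b = bit ∧ w = wl ∧ pvP data bit wl dac then max (e bit wl) dac else e b w) := by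
      by_cases hp : pvP data bit wl dac = true
      · have hp' : pvBit1 (PySem.List.pyGetD (PySem.List.pyGetD data dac []) wl 0) bit ≠ 0 := by
          simpa [pvP] using hp
        rw [if_pos hp']
        rw [pvGetD_mk B W e bit hb0 hb1]
        rw [PySem.List.pyGetD_map_pyRange_of_nonneg _ _ _ _ hwl.1 hwl.2]
        rw [pvSet_map_pyRange W _ wl _ hwl.1]
        unfold pvMk
        rw [pvSet_map_pyRange B _ bit _ hb0]
        refine List.map_congr_left (fun b _ => ?_)
        by_cases hbb : b = bit
        · subst hbb
          rw [if_pos rfl]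
          refine List.map_congr_left (fun w _ => ?_)
          by_cases hww : w = wl
          · subst hww; simp [hp]
          · simp [hww]
        · simp only [if_neg hbb]
          refine List.map_congr_left (fun w _ => ?_)
          simp [hbb]
      · have hp' : ¬ pvBit1 (PySem.List.pyGetD (PySem.List.pyGetD data dac []) wl 0) bit ≠ 0 := by
          simpa [pvP] using hp
        rw [if_neg hp']
        exact pvMk_congr _ _ _ _ (fun b w _ _ _ _ => by simp [hp])
    rw [hstep, ih (fun w hw => hlw w (List.mem_cons_of_mem _ hw))]
    apply pvMk_congr
    intro b w _ _ _ _
    by_cases hbb : b = bit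
    · subst hbb
      by_cases hww : w = wl
      · subst hww
        by_cases hp : pvP data b w dac = true
        · by_cases hr : w ∈ rest <;>
            simp [hp, hr, List.mem_cons]
        · simp [hp, List.mem_cons]
      · by_cases hr : w ∈ rest <;> simp [hww, hr, List.mem_cons]
    · simp [hbb]

-- the bit-loop over a pvMk matrix
lemma pvBitFold (data : List (List Int)) (B W dac : Int)
    (lb : List Int) (hlb : ∀ b ∈ lb, 0 ≤ b ∧ b < B) (e : Int → Int → Int) :
    lb.foldl (fun out bit =>
      (PySem.List.pyRange 0 W 1).foldl (fun out wl =>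
        if pvBit1 (PySem.List.pyGetD (PySem.List.pyGetD data dac []) wl 0) bit ≠ 0 then
          out.set bit.toNat ((PySem.List.pyGetD out bit []).set wl.toNat
            (max (PySem.List.pyGetD (PySem.List.pyGetD out bit []) wl 0) dac))
        else out) out) (pvMk B W e)
      = pvMk B W (fun b w =>
          if b ∈ lb ∧ pvP data b w dac then max (e b w) dac else e b w) := by
  induction lb generalizing e with
  | nil =>
    simp only [List.foldl_nil, List.not_mem_nil]
    exact pvMk_congr _ _ _ _ (fun b w _ _ _ _ => by simp)
  | cons bit rest ih =>
    have hb := hlb bit (List.mem_cons_self ..)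
    rw [List.foldl_cons,
        pvWlFold data B W dac bit hb.1 hb.2 _
          (fun w hw => PySem.List.mem_pyRange_one.mp hw) e,
        ih (fun b hbm => hlb b (List.mem_cons_of_mem _ hbm))]
    apply pvMk_congr
    intro b w _ _ hw0 hw1
    have hwmem : w ∈ PySem.List.pyRange 0 W 1 := PySem.List.mem_pyRange_one.mpr ⟨hw0, hw1⟩
    by_cases hbb : b = bit
    · subst hbb
      by_cases hp : pvP data b w dac = true
      · by_cases hr : b ∈ rest <;>
          simp [hp, hr, hwmem, List.mem_cons]
      · simp [hp, List.mem_cons]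
    · by_cases hr : b ∈ rest <;> simp [hbb, hr, List.mem_cons]

-- the dac-loop
lemma pvDacFold (data : List (List Int)) (B W : Int) (ld : List Int) (e : Int → Int → Int) :
    ld.foldl (fun out dac =>
      (PySem.List.pyRange 0 B 1).foldl (fun out bit =>
        (PySem.List.pyRange 0 W 1).foldl (fun out wl =>
          if pvBit1 (PySem.List.pyGetD (PySem.List.pyGetD data dac []) wl 0) bit ≠ 0 then
            out.set bit.toNat ((PySem.List.pyGetD out bit []).set wl.toNat
              (max (PySem.List.pyGetD (PySem.List.pyGetD out bit []) wl 0) dac))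
          else out) out) out) (pvMk B W e)
      = pvMk B W (fun b w =>
          ld.foldl (fun a dac => if pvP data b w dac then max a dac else a) (e b w)) := by
  induction ld generalizing e with
  | nil => simp only [List.foldl_nil]
  | cons dac rest ih =>
    rw [List.foldl_cons,
        pvBitFold data B W dac _ (fun b hbm => PySem.List.mem_pyRange_one.mp hbm) e,
        ih]
    apply pvMk_congr
    intro b w hb0 hb1 _ _
    rw [List.foldl_cons]
    congr 1
    simp [PySem.List.mem_pyRange_one, hb0, hb1]

-- bound on the ascending max-fold
lemma pvMaxFold_le (P : Int → Bool) (m : Nat) :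
    ((List.range m).map (fun k : Nat => (k : Int))).foldl
      (fun a x => if P x then max a x else a) 0 ≤ (m : Int) := by
  induction m with
  | zero => simp
  | succ m ih =>
    rw [List.range_succ, List.map_append, List.foldl_append]
    simp only [List.map_cons, List.map_nil, List.foldl_cons, List.foldl_nil]
    split_ifs
    · exact max_le (ih.trans (by push_cast; omega)) (by push_cast; omega)
    · exact ih.trans (by push_cast; omega)

-- ascending max-fold = first hit of the descending scan (Nat-range form)
lemma pvMaxFold_find_nat (P : Int → Bool) (m : Nat) :
    ((List.range m).map (fun k : Nat => (k : Int))).foldl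
      (fun a x => if P x then max a x else a) 0
      = ((((List.range m).map (fun k : Nat => (k : Int))).reverse.find? P).getD 0) := by
  induction m with
  | zero => simp
  | succ m ih =>
    rw [List.range_succ, List.map_append, List.foldl_append, List.reverse_append]
    simp only [List.map_cons, List.map_nil, List.foldl_cons, List.foldl_nil,
      List.reverse_cons, List.reverse_nil, List.nil_append, List.cons_append,
      List.find?_cons]
    by_cases hp : P (m : Int) = true
    · simp only [hp, if_pos, Option.getD_some]
      exact max_eq_right (pvMaxFold_le P m)
    · simp only [hp]
      simpa using ih

-- ascending max-fold = first hit of the descending scan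
lemma pvMaxFold_find (P : Int → Bool) (n : Int) :
    (PySem.List.pyRange 0 n 1).foldl (fun a x => if P x then max a x else a) 0
      = (((PySem.List.pyRange 0 n 1).reverse.find? P).getD 0) := by
  rw [PySem.List.pyRange_zero]
  exact pvMaxFold_find_nat P n.toNat

-- ===== VERDICT (by name: the statement is the Claim_ definition above) =====
theorem process_spec : Claim_equal_process := by
  unfold Claim_equal_process
  intro data BIT _ _
  unfold Spec_process
  simp only [process, process_alt]
  rw [show pvMatrix BIT ((PySem.List.pyGetD data 0 []).length : Int)
        = pvMk BIT ((PySem.List.pyGetD data 0 []).length : Int) (fun _ _ => 0) from rfl,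
      pvDacFold data BIT _ _ (fun _ _ => 0)]
  unfold pvMk
  refine List.map_congr_left (fun b _ => ?_)
  refine List.map_congr_left (fun w _ => ?_)
  unfold pvLastDac
  rw [PySem.List.pyRange_neg_one_eq_reverse]
  norm_num
  simp only [pvP, ne_eq, decide_not]
  exact pvMaxFold_find
    (fun dac => !decide (pvBit1 (PySem.List.pyGetD (PySem.List.pyGetD data dac []) w 0) b = 0))
    (data.length : Int)
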